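-- pv_equiv track=rewrite | github.com/jakoebl/Cube-Solver | generate_g1.py | string_from_coordinate
-- ===== SOURCE A (Python) =====
-- def string_from_coordinate(integer):
--     result = ""
--     exponent = 10
--     while exponent > -1:
--         if integer >= 2 ** exponent:
--             integer -= 2 ** exponent
--             result += "1"
--         else:
--             result += "0"
--         exponent -= 1
--     if result.count("1") % 2 == 1:
--         result += "1"
--     else:
--         result += "0"
--     return result
-- ===== SOURCE B (Python) =====
-- def string_from_coordinate(integer):
--     v = max(0, min(integer, 2047))
--     body = format(v, '011b')
--     return body + ('1' if body.count('1') % 2 == 1 else '0')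
-- ===== Notes on version B (the rewrite author's own statement) =====
-- stated objective: simpler
-- what changed: Replaces the 11-step greedy subtraction loop with a closed form: clamp the input to [0,2047], format it as an 11-bit binary string, and append one parity bit from a popcount.
import Mathlib
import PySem

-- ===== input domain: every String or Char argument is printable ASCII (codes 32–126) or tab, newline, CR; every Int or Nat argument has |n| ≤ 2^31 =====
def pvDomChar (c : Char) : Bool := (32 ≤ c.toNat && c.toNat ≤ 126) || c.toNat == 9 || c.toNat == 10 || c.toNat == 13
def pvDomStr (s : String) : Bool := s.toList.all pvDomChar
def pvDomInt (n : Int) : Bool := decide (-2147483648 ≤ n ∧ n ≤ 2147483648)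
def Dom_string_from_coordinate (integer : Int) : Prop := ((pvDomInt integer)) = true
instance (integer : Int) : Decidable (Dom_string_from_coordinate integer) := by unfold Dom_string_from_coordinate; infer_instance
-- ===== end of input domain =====

-- B replaces A's 11-step greedy subtraction loop with a closed form: clamp to [0,2047],
-- format as an 11-bit binary string, append a parity bit (objective: simpler).

-- ===== PORT A =====
-- the while loop, one constructor per remaining iteration; fuel = exponent + 1
def sfcLoop : Nat → Int → String → String
  | 0, _, result => result
  | e + 1, integer, result =>
      if integer ≥ 2 ^ e then sfcLoop e (integer - 2 ^ e) (result ++ "1")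
      else sfcLoop e integer (result ++ "0")

def string_from_coordinate (integer : Int) : String :=
  let result := sfcLoop 11 integer ""
  if PySem.Str.count result "1" % 2 == 1 then result ++ "1" else result ++ "0"

-- ===== PORT B =====
-- port of format(v, '011b'): the 11 binary digits of v, most significant first
def sfcFormat11b (v : Nat) : String :=
  String.ofList ((List.range 11).reverse.map (fun k => if v / 2 ^ k % 2 == 1 then '1' else '0'))

def string_from_coordinate_alt (integer : Int) : String :=
  let v := (max 0 (min integer 2047)).toNat
  let body := sfcFormat11b v
  if PySem.Str.count body "1" % 2 == 1 then body ++ "1" else body ++ "0"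

-- ===== PRECONDITION & SPEC =====
def Spec_string_from_coordinate (integer : Int) (out : String) : Prop := out = string_from_coordinate_alt integer
instance (integer : Int) (out : String) : Decidable (Spec_string_from_coordinate integer out) := by unfold Spec_string_from_coordinate; infer_instance

-- ===== CLAIM (what is proved, stated in full; the proofs are below) =====
def Claim_equal_string_from_coordinate : Prop := ∀ (integer : Int), Dom_string_from_coordinate integer → Spec_string_from_coordinate integer (string_from_coordinate integer)

-- ===== LEMMAS AND PROOFS =====

def sfcClamp (n : Nat) (integer : Int) : Nat := (max 0 (min integer (2 ^ n - 1))).toNat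

def sfcBits (n : Nat) (v : Nat) : List Char :=
  (List.range n).reverse.map (fun k => if v / 2 ^ k % 2 == 1 then '1' else '0')

lemma sfcClamp_lt (n : Nat) (integer : Int) : sfcClamp n integer < 2 ^ n := by
  unfold sfcClamp
  have h : (0 : Int) < 2 ^ n := by positivity
  have h3 : ((2 ^ n : Nat) : Int) = 2 ^ n := by push_cast; ring
  omega

lemma digit_top (v' n : Nat) (h : v' < 2 ^ n) : (v' + 2 ^ n) / 2 ^ n % 2 = 1 := by
  have hp : 0 < 2 ^ n := Nat.two_pow_pos n
  rw [Nat.add_div_right _ hp, Nat.div_eq_of_lt h]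

lemma digit_lo (v' n k : Nat) (h : k < n) : (v' + 2 ^ n) / 2 ^ k % 2 = v' / 2 ^ k % 2 := by
  have hk : 0 < 2 ^ k := Nat.two_pow_pos k
  have hsplit : 2 ^ n = 2 ^ k * 2 ^ (n - k) := by
    rw [← pow_add]; congr 1; omega
  rw [hsplit, Nat.add_mul_div_left _ _ hk]
  have h2 : 2 ^ (n - k) = 2 * 2 ^ (n - k - 1) := by
    rw [← pow_succ']; congr 1; omega
  omega

lemma digit_zero_of_lt (v n k : Nat) (hv : v < 2 ^ n) (h : n ≤ k) : v / 2 ^ k % 2 = 0 := by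
  have : v < 2 ^ k := lt_of_lt_of_le hv (Nat.pow_le_pow_right (by norm_num) h)
  rw [Nat.div_eq_of_lt this]

lemma sfcBits_succ_ge (n : Nat) (integer : Int) (h : integer ≥ 2 ^ n) :
    sfcBits (n + 1) (sfcClamp (n + 1) integer) = '1' :: sfcBits n (sfcClamp n (integer - 2 ^ n)) := by
  have hsum : sfcClamp (n + 1) integer = sfcClamp n (integer - 2 ^ n) + 2 ^ n := by
    unfold sfcClamp
    have h1 : (0 : Int) < 2 ^ n := by positivity
    have h2 : ((2 : Int) ^ (n + 1)) = 2 * 2 ^ n := by ring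
    have h3 : ((2 ^ n : Nat) : Int) = 2 ^ n := by push_cast; ring
    omega
  have hlt : sfcClamp n (integer - 2 ^ n) < 2 ^ n := sfcClamp_lt n _
  unfold sfcBits
  rw [List.range_succ, List.reverse_append]
  simp only [List.reverse_singleton, List.singleton_append, List.map_cons, hsum]
  congr 1
  · rw [digit_top _ _ hlt]; rfl
  · apply List.map_congr_left
    intro k hk
    have : k < n := by
      rw [List.mem_reverse, List.mem_range] at hk; exact hk
    rw [digit_lo _ _ _ this]

lemma sfcBits_succ_lt (n : Nat) (integer : Int) (h : ¬ integer ≥ 2 ^ n) :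
    sfcBits (n + 1) (sfcClamp (n + 1) integer) = '0' :: sfcBits n (sfcClamp n integer) := by
  have heq : sfcClamp (n + 1) integer = sfcClamp n integer := by
    unfold sfcClamp
    have h1 : (0 : Int) < 2 ^ n := by positivity
    have h2 : ((2 : Int) ^ (n + 1)) = 2 * 2 ^ n := by ring
    have h3 : ((2 ^ n : Nat) : Int) = 2 ^ n := by push_cast; ring
    omega
  have hlt : sfcClamp n integer < 2 ^ n := sfcClamp_lt n integer
  unfold sfcBits
  rw [List.range_succ, List.reverse_append]
  simp only [List.reverse_singleton, List.singleton_append, List.map_cons, heq]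
  congr 1
  rw [digit_zero_of_lt _ n n hlt le_rfl]; rfl

lemma string_append_mk_cons (result : String) (c : Char) (l : List Char) :
    result ++ String.ofList (c :: l) = (result ++ String.ofList [c]) ++ String.ofList l := by
  apply String.ext
  simp

lemma sfcLoop_eq (n : Nat) : ∀ (integer : Int) (result : String),
    sfcLoop n integer result = result ++ String.ofList (sfcBits n (sfcClamp n integer)) := by
  induction n with
  | zero =>
      intro integer result
      simp [sfcLoop, sfcBits]
  | succ n ih =>
      intro integer result
      by_cases h : integer ≥ 2 ^ n
      · rw [show sfcLoop (n + 1) integer result = sfcLoop n (integer - 2 ^ n) (result ++ "1") by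
          simp [sfcLoop, h]]
        rw [ih, sfcBits_succ_ge n integer h, string_append_mk_cons]
        apply String.ext; simp
      · rw [show sfcLoop (n + 1) integer result = sfcLoop n integer (result ++ "0") by
          simp [sfcLoop, h]]
        rw [ih, sfcBits_succ_lt n integer h, string_append_mk_cons]
        apply String.ext; simp

lemma sfcLoop_eq_format (integer : Int) :
    sfcLoop 11 integer "" = sfcFormat11b ((max 0 (min integer 2047)).toNat) := by
  rw [sfcLoop_eq 11 integer ""]
  have : sfcClamp 11 integer = (max 0 (min integer 2047)).toNat := by
    unfold sfcClamp; norm_num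
  rw [this]
  apply String.ext
  simp [sfcFormat11b, sfcBits]

-- ===== VERDICT (by name: the statement is the Claim_ definition above) =====
theorem string_from_coordinate_spec : Claim_equal_string_from_coordinate := by
  intro integer _
  unfold Spec_string_from_coordinate string_from_coordinate string_from_coordinate_alt
  rw [sfcLoop_eq_format]
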